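-- pv_equiv track=rewrite | github.com/gradient-pulse/phi-mesh | generate_graph_data.py | aggregate_tag_resources
-- ===== SOURCE A (Python) =====
-- from typing import Any, Dict, List, Tuple, Iterable, Optional
--
-- def aggregate_tag_resources(tag_to_pulses: Dict[str, List[str]],
--                             pulse_resources: Dict[str, Dict[str, List[Dict[str, str]]]]
--                             ) -> Dict[str, Dict[str, List[Dict[str, str]]]]:
--     out: Dict[str, Dict[str, List[Dict[str, str]]]] = {}
--     for tag, pids in tag_to_pulses.items():
--         papers: List[Dict[str, str]] = []
--         pods: List[Dict[str, str]] = []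
--         for pid in pids:
--             res = pulse_resources.get(pid, {})
--             papers.extend(res.get("papers") or [])
--             pods.extend(res.get("podcasts") or [])
--         # Dedup by URL, preserve first title seen
--         def dedup(items: List[Dict[str, str]]) -> List[Dict[str, str]]:
--             seen = {}
--             out_items: List[Dict[str, str]] = []
--             for it in items:
--                 u = it.get("url", "")
--                 if not u:
--                     continue
--                 if u in seen:
--                     continue
--                 seen[u] = True
--                 out_items.append(it)
--             return out_items
--         out[tag] = {"papers": dedup(papers), "podcasts": dedup(pods)}
--     return out
-- ===== SOURCE B (Python) =====
-- from typing import Dict, List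
--
--
-- def _gather(pids: List[str],
--             pulse_resources: Dict[str, Dict[str, List[Dict[str, str]]]],
--             kind: str) -> List[Dict[str, str]]:
--     items: List[Dict[str, str]] = []
--     for pid in pids:
--         items += (pulse_resources.get(pid, {}).get(kind) or [])
--     return [it for it in items if it.get("url", "")]
--
--
-- def _uniq(items: List[Dict[str, str]]) -> List[Dict[str, str]]:
--     # keep the head, throw away every later item with the same url, repeat
--     out: List[Dict[str, str]] = []
--     while items:
--         head = items[0]
--         u = head.get("url", "")
--         out.append(head)
--         items = [it for it in items[1:] if it.get("url", "") != u]
--     return out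
--
--
-- def aggregate_tag_resources(tag_to_pulses: Dict[str, List[str]],
--                             pulse_resources: Dict[str, Dict[str, List[Dict[str, str]]]]
--                             ) -> Dict[str, Dict[str, List[Dict[str, str]]]]:
--     return {tag: {"papers": _uniq(_gather(pids, pulse_resources, "papers")),
--                   "podcasts": _uniq(_gather(pids, pulse_resources, "podcasts"))}
--             for tag, pids in tag_to_pulses.items()}
-- ===== Notes on version B (the rewrite author's own statement) =====
-- stated objective: alternative
-- what changed: Drops A's seen-hash dedup entirely: B first filters out empty-url items in a staged gather pass, then deduplicates by repeatedly taking the head of the remaining list and filtering away all later items with the same url (no auxiliary set/dict), emitting the result from a dict comprehension.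
import Mathlib
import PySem

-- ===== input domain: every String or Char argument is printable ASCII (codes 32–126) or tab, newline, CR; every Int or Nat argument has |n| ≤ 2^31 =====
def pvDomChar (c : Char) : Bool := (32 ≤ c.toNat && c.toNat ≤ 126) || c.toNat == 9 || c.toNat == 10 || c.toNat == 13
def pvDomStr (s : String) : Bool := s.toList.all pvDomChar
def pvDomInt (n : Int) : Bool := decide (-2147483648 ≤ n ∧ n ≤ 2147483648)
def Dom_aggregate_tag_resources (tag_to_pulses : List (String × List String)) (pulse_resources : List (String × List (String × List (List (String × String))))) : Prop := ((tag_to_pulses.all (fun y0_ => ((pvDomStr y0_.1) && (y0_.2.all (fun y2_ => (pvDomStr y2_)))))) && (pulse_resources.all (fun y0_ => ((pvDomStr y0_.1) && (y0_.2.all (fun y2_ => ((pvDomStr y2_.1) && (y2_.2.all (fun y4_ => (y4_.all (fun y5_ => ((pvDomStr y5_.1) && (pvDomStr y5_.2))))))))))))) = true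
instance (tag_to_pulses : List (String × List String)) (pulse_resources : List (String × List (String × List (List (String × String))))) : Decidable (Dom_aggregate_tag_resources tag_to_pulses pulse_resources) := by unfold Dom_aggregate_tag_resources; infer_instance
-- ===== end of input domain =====

-- B replaces A's seen-hash dedup by a staged filter pass plus head-keep/filter-rest dedup with no auxiliary set (objective: alternative).

-- shared helper: Python's d.get(k) on a dict given as an association list (first match)
def pyGetAL {β : Type} (l : List (String × β)) (k : String) : Option β :=
  (l.find? (fun p => p.1 == k)).map (·.2)

-- ===== PORT A =====
-- A's inner 'dedup' helper: seen-dict + output list, one pass over the gathered items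
def atrDedup (items : List (List (String × String))) : List (List (String × String)) :=
  (items.foldl (fun (s : PySem.Dict String Bool × List (List (String × String))) it =>
      let u := (pyGetAL it "url").getD ""
      if u = "" then s
      else if s.1.contains u then s
      else (s.1.insert u true, s.2 ++ [it])) (PySem.Dict.empty, [])).2

def aggregate_tag_resources (tag_to_pulses : List (String × List String)) (pulse_resources : List (String × List (String × List (List (String × String))))) : List (String × List (String × List (List (String × String)))) :=
  (tag_to_pulses.foldl
    (fun (out : PySem.Dict String (List (String × List (List (String × String))))) tp =>
      let pr := tp.2.foldl
        (fun (s : List (List (String × String)) × List (List (String × String))) pid =>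
          let res := (pyGetAL pulse_resources pid).getD []
          (s.1 ++ ((pyGetAL res "papers").getD []), s.2 ++ ((pyGetAL res "podcasts").getD [])))
        ([], [])
      out.insert tp.1 [("papers", atrDedup pr.1), ("podcasts", atrDedup pr.2)])
    PySem.Dict.empty).items

-- ===== PORT B =====
-- B's '_gather': append all items of this kind, then drop the ones with an empty/missing url
def atrGather (pulse_resources : List (String × List (String × List (List (String × String))))) (pids : List String) (kind : String) : List (List (String × String)) :=
  (pids.foldl (fun (items : List (List (String × String))) pid =>
      items ++ ((pyGetAL ((pyGetAL pulse_resources pid).getD []) kind).getD [])) []).filter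
    (fun it => !((pyGetAL it "url").getD "" == ""))

-- B's '_uniq' while-loop: keep the head, filter every later item with the same url out of the tail
def atrUniq (items : List (List (String × String))) (out : List (List (String × String))) : List (List (String × String)) :=
  match items with
  | [] => out
  | head :: tl =>
    let u := (pyGetAL head "url").getD ""
    atrUniq (tl.filter (fun it => !((pyGetAL it "url").getD "" == u))) (out ++ [head])
termination_by items.length
decreasing_by
  have h := List.length_filter_le (fun x : {x // x ∈ tl} => !((pyGetAL x.1 "url").getD "" == (pyGetAL head "url").getD "")) tl.attach
  simp [List.length_attach] at h ⊢
  omega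

def aggregate_tag_resources_alt (tag_to_pulses : List (String × List String)) (pulse_resources : List (String × List (String × List (List (String × String))))) : List (String × List (String × List (List (String × String)))) :=
  (tag_to_pulses.foldl
    (fun (out : PySem.Dict String (List (String × List (List (String × String))))) tp =>
      out.insert tp.1 [("papers", atrUniq (atrGather pulse_resources tp.2 "papers") []),
                       ("podcasts", atrUniq (atrGather pulse_resources tp.2 "podcasts") [])])
    PySem.Dict.empty).items

-- ===== PRECONDITION & SPEC =====
def Spec_aggregate_tag_resources (tag_to_pulses : List (String × List String)) (pulse_resources : List (String × List (String × List (List (String × String))))) (out : List (String × List (String × List (List (String × String))))) : Prop := out = aggregate_tag_resources_alt tag_to_pulses pulse_resources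
instance (tag_to_pulses : List (String × List String)) (pulse_resources : List (String × List (String × List (List (String × String))))) (out : List (String × List (String × List (List (String × String))))) : Decidable (Spec_aggregate_tag_resources tag_to_pulses pulse_resources out) := by
  unfold Spec_aggregate_tag_resources
  have h1 : DecidableEq (String × List (List (String × String))) := inferInstance
  have h2 : DecidableEq (String × List (String × List (List (String × String)))) :=
    @instDecidableEqProd _ _ inferInstance (@instDecidableEqList _ h1)
  exact @instDecidableEqList _ h2 _ _

-- ===== CLAIM (what is proved, stated in full; the proofs are below) =====
def Claim_equal_aggregate_tag_resources : Prop := ∀ (tag_to_pulses : List (String × List String)) (pulse_resources : List (String × List (String × List (List (String × String))))), Dom_aggregate_tag_resources tag_to_pulses pulse_resources → Spec_aggregate_tag_resources tag_to_pulses pulse_resources (aggregate_tag_resources tag_to_pulses pulse_resources)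

-- ===== LEMMAS AND PROOFS =====

-- A's seen-dict loop produces exactly B's head-keep/filter-rest dedup of the items not yet seen.
theorem dedup_loop_eq_uniq (items : List (List (String × String)))
    (seen : PySem.Dict String Bool) (acc : List (List (String × String))) :
    (items.foldl (fun (s : PySem.Dict String Bool × List (List (String × String))) it =>
      let u := (pyGetAL it "url").getD ""
      if u = "" then s
      else if s.1.contains u then s
      else (s.1.insert u true, s.2 ++ [it])) (seen, acc)).2
    = atrUniq (items.filter
        (fun it => !((pyGetAL it "url").getD "" == "") && !seen.contains ((pyGetAL it "url").getD ""))) acc := by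
  induction items generalizing seen acc with
  | nil => rw [atrUniq.eq_def]; simp
  | cons it rest ih =>
    simp only [List.foldl_cons, List.filter_cons]
    by_cases hu : (pyGetAL it "url").getD "" = ""
    · rw [if_pos hu]
      rw [if_neg (by simp [hu])]
      exact ih seen acc
    · rw [if_neg hu]
      by_cases hc : seen.contains ((pyGetAL it "url").getD "") = true
      · rw [if_pos hc, if_neg (by simp [hc])]
        exact ih seen acc
      · rw [Bool.not_eq_true] at hc
        rw [if_neg (by simp [hc]), if_pos (by simp [hu, hc])]
        rw [atrUniq.eq_def]
        simp only []
        rw [ih (seen.insert ((pyGetAL it "url").getD "") true) (acc ++ [it])]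
        congr 1
        rw [List.filter_filter]
        apply List.filter_congr
        intro x _
        rw [PySem.Dict.contains_insert]
        by_cases hx : (pyGetAL x "url").getD "" = (pyGetAL it "url").getD "" <;>
          simp [hx, Bool.and_left_comm]

-- per kind: A's gathered-then-deduped list equals B's uniq of the gathered-and-filtered list
theorem per_kind_eq (pulse_resources : List (String × List (String × List (List (String × String)))))
    (pids : List String) (kind : String) :
    atrDedup (pids.foldl (fun acc pid =>
        acc ++ ((pyGetAL ((pyGetAL pulse_resources pid).getD []) kind).getD [])) [])
    = atrUniq (atrGather pulse_resources pids kind) [] := by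
  unfold atrDedup atrGather
  rw [dedup_loop_eq_uniq]
  congr 1
  apply List.filter_congr
  intro x _
  simp [PySem.Dict.empty]

-- ===== VERDICT (by name: the statement is the Claim_ definition above) =====
theorem aggregate_tag_resources_spec : Claim_equal_aggregate_tag_resources := by
  intro t2p pr _
  show _ = _
  unfold aggregate_tag_resources aggregate_tag_resources_alt
  congr 1
  apply PySem.List.foldl_congr_mem
  intro out tp _
  rw [PySem.List.foldl_prod_mk
       (f := fun acc pid => acc ++ ((pyGetAL ((pyGetAL pr pid).getD []) "papers").getD []))
       (g := fun acc pid => acc ++ ((pyGetAL ((pyGetAL pr pid).getD []) "podcasts").getD []))]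
  dsimp only
  rw [per_kind_eq, per_kind_eq]
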